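-- pv_equiv track=rewrite | github.com/jki14/competitive-programming | 2018/atcoder.jp/mujin-pc-2018/prob.py | solution
-- ===== SOURCE A (Python) =====
-- def solution(a, s):
--     if a == 0:
--         return True
--     for c in s:
--         if c == '+':
--             a += 1
--         else:
--             a -= 1
--         if a == 0:
--             return True
--     if a == 0:
--         return True
--     else:
--         return False
-- ===== SOURCE B (Python) =====
-- def solution(a, s):
--     lo = mx = a
--     for c in s:
--         a += 1 if c == '+' else -1
--         if a < lo:
--             lo = a
--         if a > mx:
--             mx = a
--     return lo <= 0 <= mx
-- ===== Notes on version B (the rewrite author's own statement) =====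
-- stated objective: alternative
-- what changed: Instead of checking for zero after each step with early return, B tracks the min and max of the running prefix values and returns lo <= 0 <= mx, using that +/-1 steps make the trajectory hit every integer between its extremes.
import Mathlib
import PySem

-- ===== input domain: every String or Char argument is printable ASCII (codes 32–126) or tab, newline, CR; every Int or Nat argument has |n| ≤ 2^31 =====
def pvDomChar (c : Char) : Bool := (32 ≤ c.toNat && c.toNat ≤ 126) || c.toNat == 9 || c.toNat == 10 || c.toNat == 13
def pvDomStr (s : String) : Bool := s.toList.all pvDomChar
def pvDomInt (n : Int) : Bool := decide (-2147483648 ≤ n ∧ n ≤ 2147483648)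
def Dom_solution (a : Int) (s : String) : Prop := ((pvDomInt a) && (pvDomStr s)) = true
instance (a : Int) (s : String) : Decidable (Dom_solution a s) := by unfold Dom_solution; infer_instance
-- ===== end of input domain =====

-- B replaces A's early-exit search for zero by a min/max sweep of the running prefix
-- values and the interval test lo ≤ 0 ≤ mx (alternative decomposition, same cost).

-- ===== PORT A =====
-- the for-loop of A: update a, return True as soon as it is 0, final a == 0 check
def solutionLoop (a : Int) (cs : List Char) : Bool :=
  match cs with
  | [] => if a == 0 then true else false
  | c :: r =>
    let a' := if c = '+' then a + 1 else a - 1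
    if a' == 0 then true else solutionLoop a' r

def solution (a : Int) (s : String) : Bool :=
  if a == 0 then true else solutionLoop a s.toList

-- ===== PORT B =====
-- the for-loop of B: running value a, accumulators lo and mx
def solutionAltLoop (a lo mx : Int) (cs : List Char) : Int × Int :=
  match cs with
  | [] => (lo, mx)
  | c :: r =>
    let a' := a + (if c = '+' then 1 else -1)
    solutionAltLoop a' (min lo a') (max mx a') r

def solution_alt (a : Int) (s : String) : Bool :=
  let p := solutionAltLoop a a a s.toList
  decide (p.1 ≤ 0 ∧ 0 ≤ p.2)

-- ===== PRECONDITION & SPEC =====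
def Spec_solution (a : Int) (s : String) (out : Bool) : Prop := out = solution_alt a s
instance (a : Int) (s : String) (out : Bool) : Decidable (Spec_solution a s out) := by unfold Spec_solution; infer_instance

-- ===== CLAIM (what is proved, stated in full; the proofs are below) =====
def Claim_equal_solution : Prop := ∀ (a : Int) (s : String), Dom_solution a s → Spec_solution a s (solution a s)

-- ===== LEMMAS AND PROOFS =====

-- the list of running values after each character (initial value excluded)
def steps : Int → List Char → List Int
  | _, [] => []
  | a, c :: r =>
    let a' := a + (if c = '+' then 1 else -1)
    a' :: steps a' r

-- running minimum / maximum of the value sequence including the start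
def mi : Int → List Char → Int
  | a, [] => a
  | a, c :: r => min a (mi (a + (if c = '+' then 1 else -1)) r)

def ma : Int → List Char → Int
  | a, [] => a
  | a, c :: r => max a (ma (a + (if c = '+' then 1 else -1)) r)

theorem mi_le_self (a : Int) (cs : List Char) : mi a cs ≤ a := by
  cases cs with
  | nil => simp [mi]
  | cons c r => simp [mi]

theorem self_le_ma (a : Int) (cs : List Char) : a ≤ ma a cs := by
  cases cs with
  | nil => simp [ma]
  | cons c r => simp [ma]

theorem solutionLoop_iff (cs : List Char) : ∀ a : Int, a ≠ 0 →
    (solutionLoop a cs = true ↔ (0 : Int) ∈ steps a cs) := by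
  induction cs with
  | nil => intro a ha; simp [solutionLoop, steps, ha]
  | cons c r ih =>
      intro a ha
      simp only [solutionLoop, steps, List.mem_cons]
      by_cases h0 : a + (if c = '+' then 1 else -1) = 0
      · have : (if c = '+' then a + 1 else a - 1) = 0 := by split_ifs at h0 ⊢ <;> omega
        simp [this, h0]
      · have hne : (if c = '+' then a + 1 else a - 1) ≠ 0 := by split_ifs at h0 ⊢ <;> omega
        have heq : (if c = '+' then a + 1 else a - 1) = a + (if c = '+' then 1 else -1) := by
          split_ifs <;> ring
        simp only [hne, beq_iff_eq, if_false]
        rw [heq, ih _ h0]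
        constructor
        · intro h; exact Or.inr h
        · rintro (h | h)
          · exact absurd h.symm h0
          · exact h

theorem foldl_min_swap (t : List Int) : ∀ a b : Int,
    List.foldl min (min a b) t = min a (List.foldl min b t) := by
  induction t with
  | nil => intro a b; simp
  | cons x t ih =>
      intro a b
      simp only [List.foldl]
      rw [min_assoc, ih]

theorem foldl_max_swap (t : List Int) : ∀ a b : Int,
    List.foldl max (max a b) t = max a (List.foldl max b t) := by
  induction t with
  | nil => intro a b; simp
  | cons x t ih =>
      intro a b
      simp only [List.foldl]
      rw [max_assoc, ih]

theorem altLoop_eq (cs : List Char) : ∀ a lo mx : Int,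
    solutionAltLoop a lo mx cs =
      (List.foldl min lo (steps a cs), List.foldl max mx (steps a cs)) := by
  induction cs with
  | nil => intro a lo mx; simp [solutionAltLoop, steps]
  | cons c r ih =>
      intro a lo mx
      simp only [solutionAltLoop, steps, List.foldl]
      exact ih _ _ _

theorem foldl_min_steps (cs : List Char) : ∀ a : Int,
    List.foldl min a (steps a cs) = mi a cs := by
  induction cs with
  | nil => intro a; simp [steps, mi]
  | cons c r ih =>
      intro a
      simp only [steps, mi, List.foldl]
      rw [foldl_min_swap, ih]

theorem foldl_max_steps (cs : List Char) : ∀ a : Int,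
    List.foldl max a (steps a cs) = ma a cs := by
  induction cs with
  | nil => intro a; simp [steps, ma]
  | cons c r ih =>
      intro a
      simp only [steps, ma, List.foldl]
      rw [foldl_max_swap, ih]

-- discrete intermediate value theorem for the ±1 trajectory
theorem mem_iff_interval (cs : List Char) : ∀ a : Int,
    ((0 : Int) = a ∨ (0 : Int) ∈ steps a cs) ↔ (mi a cs ≤ 0 ∧ 0 ≤ ma a cs) := by
  induction cs with
  | nil =>
      intro a
      simp only [steps, List.not_mem_nil, or_false, mi, ma]
      omega
  | cons c r ih =>
      intro a
      simp only [steps, mi, ma, List.mem_cons]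
      rw [ih]
      have h1 := mi_le_self (a + (if c = '+' then 1 else -1)) r
      have h2 := self_le_ma (a + (if c = '+' then 1 else -1)) r
      constructor
      · rintro (h | ⟨hl, hr⟩)
        · omega
        · constructor
          · exact le_trans (min_le_right _ _) hl
          · exact le_trans hr (le_max_right _ _)
      · rintro ⟨hl, hr⟩
        by_cases h0 : a = 0
        · exact Or.inl h0.symm
        · right
          constructor
          · split_ifs at * <;> omega
          · split_ifs at * <;> omega

theorem solution_eq_alt (a : Int) (s : String) : solution a s = solution_alt a s := by
  rw [Bool.eq_iff_iff]
  unfold solution solution_alt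
  rw [altLoop_eq, foldl_min_steps, foldl_max_steps]
  simp only [decide_eq_true_eq]
  by_cases h0 : a = 0
  · subst h0
    simp only [beq_self_eq_true, if_true, true_iff]
    rw [← mem_iff_interval]
    exact Or.inl rfl
  · have : (a == 0) = false := by simp [h0]
    rw [this]
    simp only [Bool.false_eq_true, if_false]
    rw [solutionLoop_iff _ _ h0, ← mem_iff_interval]
    constructor
    · intro h; exact Or.inr h
    · rintro (h | h)
      · exact absurd h.symm h0
      · exact h

-- ===== VERDICT (by name: the statement is the Claim_ definition above) =====
theorem solution_spec : Claim_equal_solution := by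
  intro a s _
  exact solution_eq_alt a s
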